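-- pv_equiv track=rewrite | github.com/zachwilcher/Exercises | verbose_num.py | short_scale_hundreds
-- ===== SOURCE A (Python) =====
-- hundred = "hundred"
--
-- names = [
--     "one",
--     "two",
--     "three",
--     "four",
--     "five",
--     "six",
--     "seven",
--     "eight",
--     "nine",
--     "ten",
--     "eleven",
--     "twelve",
--     "thirteen",
--     "fourteen",
--     "fifteen",
--     "sixteen",
--     "seventeen",
--     "eightteen",
--     "nineteen",
--     "twenty",
--     "thirty",
--     "fourty",
--     "fifty",
--     "sixty",
--     "seventy",
--     "eighty",
--     "ninety",
--     "thousand",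
--     "million",
--     "billion",
--     "trillion",
--     "quadrillion",
--     "quintillion",
--     "sextillion",
--     "septillion",
--     "octillion",
--     "nonillion",
--     "decillion",
--     "undecillion",
--     "duodecillion",
--     "tredecillion",
--     "quattuordecillion",
--     "quindecillion",
--     "sexdecillion",
--     "septendecillion",
--     "octodecillion",
--     "novemdecillion",
--     "vigintillion",
--     "centillion"
-- ]
--
-- def short_scale_hundreds(num):
--     """Takes a number and returns the short scale name of it if it's less than 1000."""
--     # the values in names are somewhat arbitrary so magic offsets are used
--     if (num == 0) or (num >= 1000):
--         return [""]
--     elif num <= 20: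
--         return [names[num - 1]]
--     elif num < 100:
--         return [names[(num // 10) + 17]] + short_scale_hundreds(num % 10)
--     else:
--         return [names[(num // 100) - 1], hundred] + short_scale_hundreds(num % 100)
-- ===== SOURCE B (Python) =====
-- hundred = "hundred"
--
-- names = [
--     "one", "two", "three", "four", "five", "six", "seven", "eight", "nine",
--     "ten", "eleven", "twelve", "thirteen", "fourteen", "fifteen", "sixteen",
--     "seventeen", "eightteen", "nineteen", "twenty", "thirty", "fourty",
--     "fifty", "sixty", "seventy", "eighty", "ninety", "thousand", "million",
--     "billion", "trillion", "quadrillion", "quintillion", "sextillion",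
--     "septillion", "octillion", "nonillion", "decillion", "undecillion",
--     "duodecillion", "tredecillion", "quattuordecillion", "quindecillion",
--     "sexdecillion", "septendecillion", "octodecillion", "novemdecillion",
--     "vigintillion", "centillion"
-- ]
--
-- def short_scale_hundreds(num):
--     """Takes a number and returns the short scale name of it if it's less than 1000."""
--     if num == 0 or num >= 1000:
--         return [""]
--     if num <= 20:
--         return [names[num - 1]]
--     # flat digit decomposition: hundreds head, then tens/units tail, no loop/recursion
--     h, rem = divmod(num, 100)
--     head = [names[h - 1], hundred] if h else []
--     if rem == 0:
--         return head + [""]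
--     if rem <= 20:
--         return head + [names[rem - 1]]
--     t, u = divmod(rem, 10)
--     tail = [""] if u == 0 else [names[u - 1]]
--     return head + [names[t + 17]] + tail
-- ===== Notes on version B (the rewrite author's own statement) =====
-- stated objective: simpler
-- what changed: Replaced A's self-recursion with a flat, straight-line digit decomposition: divmod(num,100) gives a hundreds head, then the 0..99 remainder is handled by direct case analysis (empty-string/teen/tens-units) with no loop or recursion.
import Mathlib
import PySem

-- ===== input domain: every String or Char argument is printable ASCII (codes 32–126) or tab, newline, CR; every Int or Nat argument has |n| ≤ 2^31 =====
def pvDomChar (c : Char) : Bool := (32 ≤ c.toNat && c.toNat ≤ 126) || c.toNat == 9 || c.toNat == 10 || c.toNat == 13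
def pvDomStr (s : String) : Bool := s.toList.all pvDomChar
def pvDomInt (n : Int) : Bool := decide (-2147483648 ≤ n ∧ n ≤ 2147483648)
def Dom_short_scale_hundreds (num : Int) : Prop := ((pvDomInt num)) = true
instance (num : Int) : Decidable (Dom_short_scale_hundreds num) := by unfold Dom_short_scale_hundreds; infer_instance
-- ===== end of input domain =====

-- B replaces A's recursion by a flat straight-line digit decomposition (same values, same order); objective: simpler, no speed claim.

-- ===== PORT A =====
def pvNames : List String := [
  "one", "two", "three", "four", "five", "six", "seven", "eight", "nine",
  "ten", "eleven", "twelve", "thirteen", "fourteen", "fifteen", "sixteen",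
  "seventeen", "eightteen", "nineteen", "twenty", "thirty", "fourty",
  "fifty", "sixty", "seventy", "eighty", "ninety", "thousand", "million",
  "billion", "trillion", "quadrillion", "quintillion", "sextillion",
  "septillion", "octillion", "nonillion", "decillion", "undecillion",
  "duodecillion", "tredecillion", "quattuordecillion", "quindecillion",
  "sexdecillion", "septendecillion", "octodecillion", "novemdecillion",
  "vigintillion", "centillion"]

-- literal transliteration of A's recursion; pyGetD is exact under Pre_ (index in range)
def short_scale_hundreds (num : Int) : List String :=
  if num = 0 ∨ num ≥ 1000 then [""]
  else if num ≤ 20 then [PySem.List.pyGetD pvNames (num - 1) ""]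
  else if num < 100 then
    PySem.List.pyGetD pvNames (PySem.Int.floordiv num 10 + 17) "" ::
      short_scale_hundreds (PySem.Int.mod num 10)
  else
    PySem.List.pyGetD pvNames (PySem.Int.floordiv num 100 - 1) "" :: "hundred" ::
      short_scale_hundreds (PySem.Int.mod num 100)
termination_by num.toNat
decreasing_by
  all_goals
    simp only [PySem.Int.mod_eq_emod_of_pos (by norm_num : (0:Int) < 10),
               PySem.Int.mod_eq_emod_of_pos (by norm_num : (0:Int) < 100)]; omega

-- ===== PORT B =====
-- Source B's straight-line decomposition: hundreds head via divmod, then flat case analysis of the remainder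
def short_scale_hundreds_alt (num : Int) : List String :=
  if num = 0 ∨ num ≥ 1000 then [""]
  else if num ≤ 20 then [PySem.List.pyGetD pvNames (num - 1) ""]
  else
    let h := PySem.Int.floordiv num 100
    let rem := PySem.Int.mod num 100
    let head := if h ≠ 0 then [PySem.List.pyGetD pvNames (h - 1) "", "hundred"] else []
    if rem = 0 then head ++ [""]
    else if rem ≤ 20 then head ++ [PySem.List.pyGetD pvNames (rem - 1) ""]
    else
      let t := PySem.Int.floordiv rem 10
      let u := PySem.Int.mod rem 10
      let tail := if u = 0 then [""] else [PySem.List.pyGetD pvNames (u - 1) ""]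
      head ++ [PySem.List.pyGetD pvNames (t + 17) ""] ++ tail

-- ===== PRECONDITION & SPEC =====
-- Pre_ excludes num ≤ -49: there the Python A (names[num - 1]) raises IndexError (and B raises identically).
def Pre_short_scale_hundreds (num : Int) : Prop := -48 ≤ num
instance (num : Int) : Decidable (Pre_short_scale_hundreds num) := by
  unfold Pre_short_scale_hundreds; infer_instance
def pvWitness_short_scale_hundreds : Int := 123

def Spec_short_scale_hundreds (num : Int) (out : List String) : Prop := out = short_scale_hundreds_alt num
instance (num : Int) (out : List String) : Decidable (Spec_short_scale_hundreds num out) := by unfold Spec_short_scale_hundreds; infer_instance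

-- ===== CLAIM (what is proved, stated in full; the proofs are below) =====
def Claim_equal_short_scale_hundreds : Prop := ∀ (num : Int), Dom_short_scale_hundreds num → Pre_short_scale_hundreds num → Spec_short_scale_hundreds num (short_scale_hundreds num)

-- ===== LEMMAS AND PROOFS =====

-- A on a one-digit remainder 0..9: the base of A's recursion
theorem pvA_digit (u : Int) (h0 : 0 ≤ u) (h9 : u ≤ 9) :
    short_scale_hundreds u = if u = 0 then [""] else [PySem.List.pyGetD pvNames (u - 1) ""] := by
  by_cases hu : u = 0
  · rw [short_scale_hundreds, if_pos (Or.inl hu), if_pos hu]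
  · rw [short_scale_hundreds, if_neg (show ¬(u = 0 ∨ u ≥ 1000) by omega),
        if_pos (show u ≤ 20 by omega), if_neg hu]

-- A on 21..99: one unfolding of A's recursion plus pvA_digit
theorem pvA_tens (r : Int) (h21 : 21 ≤ r) (h99 : r ≤ 99) :
    short_scale_hundreds r =
      PySem.List.pyGetD pvNames (PySem.Int.floordiv r 10 + 17) "" ::
        (if PySem.Int.mod r 10 = 0 then [""]
         else [PySem.List.pyGetD pvNames (PySem.Int.mod r 10 - 1) ""]) := by
  have hm : PySem.Int.mod r 10 = r % 10 := PySem.Int.mod_eq_emod_of_pos (by norm_num)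
  rw [short_scale_hundreds, if_neg (show ¬(r = 0 ∨ r ≥ 1000) by omega),
      if_neg (show ¬ r ≤ 20 by omega), if_pos (show r < 100 by omega),
      pvA_digit _ (by rw [hm]; omega) (by rw [hm]; omega)]

-- A on a remainder 0..99, flattened
theorem pvA_rem (r : Int) (h0 : 0 ≤ r) (h99 : r ≤ 99) :
    short_scale_hundreds r =
      if r = 0 then [""]
      else if r ≤ 20 then [PySem.List.pyGetD pvNames (r - 1) ""]
      else
        PySem.List.pyGetD pvNames (PySem.Int.floordiv r 10 + 17) "" ::
          (if PySem.Int.mod r 10 = 0 then [""]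
           else [PySem.List.pyGetD pvNames (PySem.Int.mod r 10 - 1) ""]) := by
  by_cases hr0 : r = 0
  · rw [if_pos hr0, short_scale_hundreds, if_pos (Or.inl hr0)]
  · rw [if_neg hr0]
    by_cases hr20 : r ≤ 20
    · rw [if_pos hr20, short_scale_hundreds,
          if_neg (show ¬(r = 0 ∨ r ≥ 1000) by omega), if_pos hr20]
    · rw [if_neg hr20, pvA_tens r (by omega) (by omega)]

-- ===== VERDICT (by name: the statement is the Claim_ definition above) =====
theorem short_scale_hundreds_spec : Claim_equal_short_scale_hundreds := by
  intro num _ _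
  unfold Spec_short_scale_hundreds short_scale_hundreds_alt
  by_cases hg : num = 0 ∨ num ≥ 1000
  · rw [if_pos hg, short_scale_hundreds, if_pos hg]
  · rw [if_neg hg]
    by_cases h20 : num ≤ 20
    · rw [if_pos h20, short_scale_hundreds, if_neg hg, if_pos h20]
    · rw [if_neg h20]
      by_cases h100 : num < 100
      · -- 21..99: hundreds digit 0, remainder = num
        have hd : PySem.Int.floordiv num 100 = 0 := by
          rw [PySem.Int.floordiv_eq_ediv_of_pos (by norm_num)]; omega
        have hm : PySem.Int.mod num 100 = num := by
          rw [PySem.Int.mod_eq_emod_of_pos (by norm_num)]; omega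
        rw [pvA_tens num (by omega) (by omega)]
        simp only [hd, hm, ne_eq, not_true_eq_false, if_false]
        rw [if_neg (show ¬ num = 0 by omega), if_neg h20]
        split_ifs <;> simp
      · -- 100..999: hundreds digit ≥ 1, remainder = num % 100
        have hd : PySem.Int.floordiv num 100 ≠ 0 := by
          rw [PySem.Int.floordiv_eq_ediv_of_pos (by norm_num)]; omega
        have hm0 : 0 ≤ PySem.Int.mod num 100 := by
          rw [PySem.Int.mod_eq_emod_of_pos (by norm_num)]; omega
        have hm99 : PySem.Int.mod num 100 ≤ 99 := by
          rw [PySem.Int.mod_eq_emod_of_pos (by norm_num)]; omega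
        rw [short_scale_hundreds, if_neg hg, if_neg h20, if_neg h100,
            pvA_rem _ hm0 hm99]
        simp only [ne_eq, hd, not_false_eq_true, if_true]
        split_ifs <;> simp
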